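-- pv_equiv track=rewrite | github.com/Mourud/advent-of-code | 2024/day8.py | find_antinodes_p2
-- ===== SOURCE A (Python) =====
-- def is_in_bounds(pos, size):
--     for p in pos:
--         if p < 0 or p >= size:
--             return False
--     return True
--
-- def find_antinodes_p2(i, j, data):
--     antinodes = set()
--     for x in range(i, len(data)):
--         for y in range(len(data)):
--             if x == i and y == j:
--                 continue
--             if data[i][j] == data[x][y]:
--                 v_dist = x - i
--                 h_dist = y - j
--                 an1 = [i  , j ]
--                 while is_in_bounds(an1, len(data)):
--                     antinodes.add(tuple(an1))
--                     an1[0] -= v_dist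
--                     an1[1] -= h_dist
--                 an2 = [x , y ]
--                 while is_in_bounds(an2, len(data)):
--                     antinodes.add(tuple(an2))
--                     an2[0] += v_dist
--                     an2[1] += h_dist
--     return antinodes
-- ===== SOURCE B (Python) =====
-- def _steps(a, d, n):
--     # largest s >= 0 with 0 <= a + s*d < n (for 0 <= a < n); n-1 caps the d == 0 axis
--     if d > 0:
--         return (n - 1 - a) // d
--     if d < 0:
--         return a // -d
--     return n - 1
--
-- def find_antinodes_p2(i, j, data):
--     n = len(data)
--     matches = [(x, y) for x in range(i, n) for y in range(n)
--                if (x, y) != (i, j) and data[i][j] == data[x][y]]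
--     antinodes = set()
--     for x, y in matches:
--         v, h = x - i, y - j
--         k1 = min(_steps(i, -v, n), _steps(j, -h, n))
--         antinodes.update((i - s * v, j - s * h) for s in range(k1 + 1))
--         k2 = min(_steps(x, v, n), _steps(y, h, n))
--         antinodes.update((x + s * v, y + s * h) for s in range(k2 + 1))
--     return antinodes
-- ===== Notes on version B (the rewrite author's own statement) =====
-- stated objective: alternative
-- what changed: B replaces A's step-and-test while-loop ray walks by a closed-form computation of each ray's in-bounds extent via integer division (_steps), emitting the whole arithmetic progression unconditionally after a single pass collecting matching cells.
-- outside the precondition, e.g. on find_antinodes_p2(-2, -2, [['c', 'a_x'], ['a_x', 'z1']]): A returns {(0, 0)}, B returns {(-2, 0), (0, 0)}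
import Mathlib
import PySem

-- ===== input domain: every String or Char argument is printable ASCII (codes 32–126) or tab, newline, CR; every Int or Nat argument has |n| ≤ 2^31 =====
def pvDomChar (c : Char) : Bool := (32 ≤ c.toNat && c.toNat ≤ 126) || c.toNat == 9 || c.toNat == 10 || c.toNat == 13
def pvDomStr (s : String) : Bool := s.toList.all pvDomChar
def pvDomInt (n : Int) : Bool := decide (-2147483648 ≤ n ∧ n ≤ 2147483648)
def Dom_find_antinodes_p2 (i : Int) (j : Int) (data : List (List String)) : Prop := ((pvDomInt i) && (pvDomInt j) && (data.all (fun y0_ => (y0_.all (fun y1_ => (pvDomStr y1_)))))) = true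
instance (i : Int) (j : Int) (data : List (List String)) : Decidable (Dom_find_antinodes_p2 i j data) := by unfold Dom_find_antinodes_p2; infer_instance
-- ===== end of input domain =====

-- B replaces A's step-and-test while-loop ray walks by a closed-form computation of each ray's
-- in-bounds extent via integer division, emitting the whole arithmetic progression unconditionally
-- after one pass collecting the matching cells (objective: alternative).

-- ===== PORT A =====
-- helper is_in_bounds(pos, size)
def pv_is_in_bounds (pos : List Int) (size : Int) : Bool :=
  pos.all (fun p => !(decide (p < 0) || decide (p ≥ size)))

-- the two 'while is_in_bounds' loops of A; an1's '-=' step is passed as the negated step.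
-- fuel (length+1) strictly exceeds the number of iterations any call performs inside Pre_.
def pvWalk (fuel : Nat) (a b : Int) (dv dh : Int) (size : Int)
    (acc : PySem.Set (Int × Int)) : PySem.Set (Int × Int) :=
  match fuel with
  | 0 => acc
  | Nat.succ f =>
      if pv_is_in_bounds [a, b] size then
        pvWalk f (a + dv) (b + dh) dv dh size (PySem.Set.add acc (a, b))
      else acc

def find_antinodes_p2 (i : Int) (j : Int) (data : List (List String)) : List (Int × Int) :=
  let n : Int := data.length
  (PySem.List.pyRange i n 1).foldl (fun acc x =>
    (PySem.List.pyRange 0 n 1).foldl (fun acc y =>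
      if x = i ∧ y = j then acc
      else if PySem.List.pyGetD (PySem.List.pyGetD data i []) j "" =
              PySem.List.pyGetD (PySem.List.pyGetD data x []) y "" then
        let v := x - i
        let h := y - j
        pvWalk (data.length + 1) x y v h n (pvWalk (data.length + 1) i j (-v) (-h) n acc)
      else acc) acc) PySem.Set.empty

-- ===== PORT B =====
-- _steps(a, d, n): largest s ≥ 0 with 0 ≤ a + s*d < n (for 0 ≤ a < n); n-1 caps the d = 0 axis
def pvSteps (a d n : Int) : Int :=
  if 0 < d then PySem.Int.floordiv (n - 1 - a) d
  else if d < 0 then PySem.Int.floordiv a (-d)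
  else n - 1

def find_antinodes_p2_alt (i : Int) (j : Int) (data : List (List String)) : List (Int × Int) :=
  let n : Int := data.length
  let mlist : List (Int × Int) :=
    (PySem.List.pyRange i n 1).flatMap (fun x =>
      ((PySem.List.pyRange 0 n 1).filter (fun y =>
          decide (¬(x = i ∧ y = j)) &&
          decide (PySem.List.pyGetD (PySem.List.pyGetD data i []) j "" =
                  PySem.List.pyGetD (PySem.List.pyGetD data x []) y ""))).map (fun y => (x, y)))
  mlist.foldl (fun acc m =>
    let v := m.1 - i
    let h := m.2 - j
    let k1 := min (pvSteps i (-v) n) (pvSteps j (-h) n)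
    let acc1 := PySem.Set.update acc
      ((PySem.List.pyRange 0 (k1 + 1) 1).map (fun s => (i - s * v, j - s * h)))
    let k2 := min (pvSteps m.1 v n) (pvSteps m.2 h n)
    PySem.Set.update acc1
      ((PySem.List.pyRange 0 (k2 + 1) 1).map (fun s => (m.1 + s * v, m.2 + s * h))))
    PySem.Set.empty

-- ===== PRECONDITION & SPEC =====
-- Pre_ excludes (a) inputs where A raises IndexError (j not a valid Python index of row i, or a row
-- from i on shorter than the grid height, whenever a comparison is actually executed), and (b) negative i,
-- where A returns but Python's negative-index wraparound makes it compare against wrapped rows while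
-- emitting raw coordinates — an accidental corner of A's indexing.
def Pre_find_antinodes_p2 (i : Int) (j : Int) (data : List (List String)) : Prop :=
  -- e.g. i = 0, j = 1, data = [["a", "b"], ["b", "a"]] is admitted; i = -1 is not (Python wraps data[-1])
  0 ≤ i ∧ ((data.length : Int) ≤ i ∨ (data.length = 1 ∧ j = 0) ∨
    (PySem.Raise.InRange (data.getD i.toNat []).length j ∧
     ∀ row ∈ data.drop i.toNat, (data.length : Int) ≤ (row.length : Int)))
instance (i : Int) (j : Int) (data : List (List String)) : Decidable (Pre_find_antinodes_p2 i j data) := by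
  unfold Pre_find_antinodes_p2; infer_instance

def pvWitness_find_antinodes_p2 : Int × Int × List (List String) :=
  (0, 0, [["a", "b"], ["b", "a"]])

def Spec_find_antinodes_p2 (i : Int) (j : Int) (data : List (List String)) (out : List (Int × Int)) : Prop :=
  out = find_antinodes_p2_alt i j data
instance (i : Int) (j : Int) (data : List (List String)) (out : List (Int × Int)) : Decidable (Spec_find_antinodes_p2 i j data out) := by
  unfold Spec_find_antinodes_p2; infer_instance

-- ===== CLAIM (what is proved, stated in full; the proofs are below) =====
def Claim_equal_find_antinodes_p2 : Prop := ∀ (i : Int) (j : Int) (data : List (List String)), Dom_find_antinodes_p2 i j data → Pre_find_antinodes_p2 i j data → Spec_find_antinodes_p2 i j data (find_antinodes_p2 i j data)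

-- ===== LEMMAS AND PROOFS =====

-- proof-only: the list of points one of A's while-loops visits, in order
def pvWalkList (fuel : Nat) (a b : Int) (dv dh : Int) (size : Int) : List (Int × Int) :=
  match fuel with
  | 0 => []
  | Nat.succ f =>
      if pv_is_in_bounds [a, b] size then (a, b) :: pvWalkList f (a + dv) (b + dh) dv dh size
      else []

lemma pvWalk_eq_update (fuel : Nat) (a b dv dh size : Int) (acc : PySem.Set (Int × Int)) :
    pvWalk fuel a b dv dh size acc = PySem.Set.update acc (pvWalkList fuel a b dv dh size) := by
  induction fuel generalizing a b acc with
  | zero => simp [pvWalk, pvWalkList, PySem.Set.update]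
  | succ f ih =>
      by_cases h : pv_is_in_bounds [a, b] size
      · simp [pvWalk, pvWalkList, h, ih, PySem.Set.update]
      · simp [pvWalk, pvWalkList, h, PySem.Set.update]

lemma pv_inb_pair (a b size : Int) :
    pv_is_in_bounds [a, b] size = true ↔ (0 ≤ a ∧ a < size) ∧ (0 ≤ b ∧ b < size) := by
  simp [pv_is_in_bounds]

lemma pvWalkList_nil (fuel : Nat) (a b dv dh size : Int)
    (h : ¬ pv_is_in_bounds [a, b] size = true) :
    pvWalkList fuel a b dv dh size = [] := by
  cases fuel <;> simp [pvWalkList, h]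

-- closed form of a walk, from a characterization of the in-bounds steps
lemma pvWalkList_closed (fuel : Nat) (a b dv dh n K : Int) (hK : 0 ≤ K)
    (hchar : ∀ s : Int, 0 ≤ s →
      ((0 ≤ a + s * dv ∧ a + s * dv < n) ∧ (0 ≤ b + s * dh ∧ b + s * dh < n) ↔ s ≤ K))
    (hfuel : K < (fuel : Int)) :
    pvWalkList fuel a b dv dh n
      = (PySem.List.pyRange 0 (K + 1) 1).map (fun s => (a + s * dv, b + s * dh)) := by
  induction fuel generalizing a b K with
  | zero => omega
  | succ f ih =>
      have h0 : pv_is_in_bounds [a, b] n = true := by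
        rw [pv_inb_pair]
        have := (hchar 0 le_rfl).mpr hK
        simpa using this
      rw [pvWalkList, if_pos h0]
      by_cases hK0 : K = 0
      · subst hK0
        have h1 : ¬ pv_is_in_bounds [a + dv, b + dh] n = true := by
          rw [pv_inb_pair]
          intro hcon
          have := (hchar 1 (by omega)).mp (by simpa using hcon)
          omega
        rw [pvWalkList_nil _ _ _ _ _ _ h1]
        rw [show (0:Int) + 1 = 0 + 1 by ring, PySem.List.pyRange_one_singleton]
        simp
      · have hchar' : ∀ s : Int, 0 ≤ s →
            ((0 ≤ (a + dv) + s * dv ∧ (a + dv) + s * dv < n) ∧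
             (0 ≤ (b + dh) + s * dh ∧ (b + dh) + s * dh < n) ↔ s ≤ K - 1) := by
          intro s hs
          have h := hchar (s + 1) (by omega)
          constructor
          · intro hc
            have : s + 1 ≤ K := h.mp (by constructor <;> constructor <;> nlinarith [hc.1.1, hc.1.2, hc.2.1, hc.2.2])
            omega
          · intro hc
            have := h.mpr (by omega)
            constructor <;> constructor <;> nlinarith [this.1.1, this.1.2, this.2.1, this.2.2]
        have ihh := ih (a + dv) (b + dh) (K - 1) (by omega) hchar' (by push_cast at hfuel ⊢; omega)
        rw [ihh]
        rw [PySem.List.pyRange_one_cons (show (0:Int) < K + 1 by omega)]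
        simp only [List.map_cons, zero_mul, add_zero]
        congr 1
        rw [show K - 1 + 1 = K by ring]
        rw [PySem.List.pyRange_one, PySem.List.pyRange_one, List.map_map, List.map_map]
        rw [show (K + 1 - (0 + 1) : Int) = K by ring, show (K - 0 : Int) = K by ring]
        apply List.map_congr_left
        intro k _
        simp only [Function.comp_apply, Prod.mk.injEq]
        constructor <;> ring

-- per-coordinate spec of pvSteps
lemma pvSteps_spec (a d n : Int) (h0 : 0 ≤ a) (h1 : a < n) (hd : d ≠ 0) :
    (0 ≤ pvSteps a d n ∧ pvSteps a d n ≤ n - 1) ∧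
    ∀ s : Int, 0 ≤ s → ((0 ≤ a + s * d ∧ a + s * d < n) ↔ s ≤ pvSteps a d n) := by
  rcases lt_trichotomy d 0 with hdn | rfl | hdp
  · have hpos : 0 < -d := by omega
    have hsteps : pvSteps a d n = PySem.Int.floordiv a (-d) := by
      simp only [pvSteps, if_neg (by omega : ¬ (0:Int) < d), if_pos hdn]
    rw [hsteps]
    refine ⟨⟨?_, ?_⟩, ?_⟩
    · rw [PySem.Int.le_floordiv_iff_mul_le hpos]; nlinarith
    · have : PySem.Int.floordiv a (-d) < n := by
        rw [PySem.Int.floordiv_lt_iff_lt_mul hpos]; nlinarith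
      omega
    · intro s hs
      have hlow : a + s * d < n := by nlinarith
      rw [PySem.Int.le_floordiv_iff_mul_le hpos]
      constructor
      · intro h; nlinarith [h.1]
      · intro h; constructor
        · nlinarith
        · exact hlow
  · exact absurd rfl hd
  · have hsteps : pvSteps a d n = PySem.Int.floordiv (n - 1 - a) d := by
      simp only [pvSteps, if_pos hdp]
    rw [hsteps]
    refine ⟨⟨?_, ?_⟩, ?_⟩
    · rw [PySem.Int.le_floordiv_iff_mul_le hdp]; nlinarith
    · have : PySem.Int.floordiv (n - 1 - a) d < n := by
        rw [PySem.Int.floordiv_lt_iff_lt_mul hdp]; nlinarith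
      omega
    · intro s hs
      have hge : 0 ≤ a + s * d := by nlinarith
      rw [PySem.Int.le_floordiv_iff_mul_le hdp]
      constructor
      · intro h; nlinarith [h.2]
      · intro h; exact ⟨hge, by nlinarith⟩

-- pvSteps is negative when the start coordinate is outside the grid and the step points away
lemma pvSteps_neg_low (a d n : Int) (ha : a < 0) (hd : d < 0) : pvSteps a d n < 0 := by
  have hpos : 0 < -d := by omega
  have : pvSteps a d n = PySem.Int.floordiv a (-d) := by
    simp only [pvSteps, if_neg (by omega : ¬ (0:Int) < d), if_pos hd]
  rw [this, PySem.Int.floordiv_lt_iff_lt_mul hpos]; nlinarith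

lemma pvSteps_neg_high (a d n : Int) (ha : n ≤ a) (hd : 0 < d) : pvSteps a d n < 0 := by
  have : pvSteps a d n = PySem.Int.floordiv (n - 1 - a) d := by
    simp only [pvSteps, if_pos hd]
  rw [this, PySem.Int.floordiv_lt_iff_lt_mul hd]; nlinarith

-- combined two-coordinate characterization for an in-grid start
lemma pvK_spec (a b dv dh n : Int) (ha0 : 0 ≤ a) (han : a < n) (hb0 : 0 ≤ b) (hbn : b < n)
    (hnz : ¬(dv = 0 ∧ dh = 0)) :
    (0 ≤ min (pvSteps a dv n) (pvSteps b dh n) ∧ min (pvSteps a dv n) (pvSteps b dh n) ≤ n - 1) ∧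
    ∀ s : Int, 0 ≤ s →
      ((0 ≤ a + s * dv ∧ a + s * dv < n) ∧ (0 ≤ b + s * dh ∧ b + s * dh < n) ↔
        s ≤ min (pvSteps a dv n) (pvSteps b dh n)) := by
  by_cases hdv : dv = 0
  · have hdh : dh ≠ 0 := fun h => hnz ⟨hdv, h⟩
    obtain ⟨⟨hb1, hb2⟩, hbs⟩ := pvSteps_spec b dh n hb0 hbn hdh
    have hsa : pvSteps a dv n = n - 1 := by
      simp only [pvSteps, hdv]; norm_num
    rw [hsa]
    refine ⟨by omega, ?_⟩
    intro s hs
    subst hdv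
    simp only [mul_zero, add_zero]
    constructor
    · intro h; have := (hbs s hs).mp h.2; omega
    · intro h; exact ⟨⟨ha0, han⟩, (hbs s hs).mpr (by omega)⟩
  · by_cases hdh : dh = 0
    · obtain ⟨⟨ha1, ha2⟩, has⟩ := pvSteps_spec a dv n ha0 han hdv
      have hsb : pvSteps b dh n = n - 1 := by
        simp only [pvSteps, hdh]; norm_num
      rw [hsb]
      refine ⟨by omega, ?_⟩
      intro s hs
      subst hdh
      simp only [mul_zero, add_zero]
      constructor
      · intro h; have := (has s hs).mp h.1; omega
      · intro h; exact ⟨(has s hs).mpr (by omega), hb0, hbn⟩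
    · obtain ⟨⟨ha1, ha2⟩, has⟩ := pvSteps_spec a dv n ha0 han hdv
      obtain ⟨⟨hb1, hb2⟩, hbs⟩ := pvSteps_spec b dh n hb0 hbn hdh
      refine ⟨by omega, ?_⟩
      intro s hs
      rw [has s hs, hbs s hs]
      omega

-- an in-grid walk equals B's closed-form progression
lemma pvWalk_closed (a b dv dh n : Int) (ha0 : 0 ≤ a) (han : a < n) (hb0 : 0 ≤ b) (hbn : b < n)
    (hnz : ¬(dv = 0 ∧ dh = 0)) (fuel : Nat) (hfuel : n ≤ (fuel : Int)) :
    pvWalkList fuel a b dv dh n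
      = (PySem.List.pyRange 0 (min (pvSteps a dv n) (pvSteps b dh n) + 1) 1).map
          (fun s => (a + s * dv, b + s * dh)) := by
  obtain ⟨⟨hK0, hK1⟩, hchar⟩ := pvK_spec a b dv dh n ha0 han hb0 hbn hnz
  exact pvWalkList_closed fuel a b dv dh n _ hK0 hchar (by omega)

-- A's two walks for one matching cell equal B's two set updates
lemma pv_per_match (n i j x y : Int) (hi0 : 0 ≤ i) (hx : i ≤ x) (hxn : x < n)
    (hy0 : 0 ≤ y) (hyn : y < n) (hne : ¬(x = i ∧ y = j)) (fuel : Nat) (hfuel : n ≤ (fuel : Int))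
    (acc : PySem.Set (Int × Int)) :
    pvWalk fuel x y (x - i) (y - j) n (pvWalk fuel i j (-(x - i)) (-(y - j)) n acc)
      = PySem.Set.update
          (PySem.Set.update acc
            ((PySem.List.pyRange 0 (min (pvSteps i (-(x - i)) n) (pvSteps j (-(y - j)) n) + 1) 1).map
              (fun s => (i - s * (x - i), j - s * (y - j)))))
          ((PySem.List.pyRange 0 (min (pvSteps x (x - i) n) (pvSteps y (y - j) n) + 1) 1).map
            (fun s => (x + s * (x - i), y + s * (y - j)))) := by
  rw [pvWalk_eq_update, pvWalk_eq_update]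
  have hfun1 : (fun s : Int => (i + s * (-(x - i)), j + s * (-(y - j))))
      = (fun s : Int => (i - s * (x - i), j - s * (y - j))) := by
    funext s; simp only [Prod.mk.injEq]; constructor <;> ring
  by_cases hj : 0 ≤ j ∧ j < n
  · -- (i, j) in the grid: both rays are closed-form progressions
    have hnz : ¬(x - i = 0 ∧ y - j = 0) := by
      intro h; exact hne ⟨by omega, by omega⟩
    have hnz1 : ¬(-(x - i) = 0 ∧ -(y - j) = 0) := by
      intro h; exact hnz ⟨by omega, by omega⟩
    rw [pvWalk_closed x y (x - i) (y - j) n (by omega) hxn hy0 hyn hnz fuel hfuel]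
    rw [pvWalk_closed i j (-(x - i)) (-(y - j)) n hi0 (by omega) hj.1 hj.2 hnz1 fuel hfuel]
    rw [hfun1]
  · -- j outside the grid: A's first walk adds nothing, and B's first range is empty
    have hinb : ¬ pv_is_in_bounds [i, j] n = true := by
      rw [pv_inb_pair]; intro h; exact hj h.2
    rw [pvWalkList_nil _ _ _ _ _ _ hinb]
    have hsneg : pvSteps j (-(y - j)) n < 0 := by
      rcases not_and_or.mp hj with h | h
      · exact pvSteps_neg_low j (-(y - j)) n (by omega) (by omega)
      · exact pvSteps_neg_high j (-(y - j)) n (by omega) (by omega)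
    have hnil : PySem.List.pyRange 0 (min (pvSteps i (-(x - i)) n) (pvSteps j (-(y - j)) n) + 1) 1 = [] := by
      apply PySem.List.pyRange_one_eq_nil; omega
    rw [hnil]
    have hnz : ¬(x - i = 0 ∧ y - j = 0) := by
      intro h
      rcases not_and_or.mp hj with hc | hc <;> omega
    rw [pvWalk_closed x y (x - i) (y - j) n (by omega) hxn hy0 hyn hnz fuel hfuel]
    simp [PySem.Set.update]

-- ===== VERDICT (by name: the statement is the Claim_ definition above) =====
theorem find_antinodes_p2_spec : Claim_equal_find_antinodes_p2 := by
  intro i j data _ hpre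
  unfold Spec_find_antinodes_p2
  obtain ⟨hi0, -⟩ := hpre
  simp only [find_antinodes_p2, find_antinodes_p2_alt]
  by_cases hni : (data.length : Int) ≤ i
  · rw [PySem.List.pyRange_one_eq_nil hni]
    simp
  · rw [List.foldl_flatMap]
    apply PySem.List.foldl_congr_mem
    intro acc x hx
    obtain ⟨hxi, hxn⟩ := PySem.List.mem_pyRange_one.mp hx
    rw [List.foldl_map]
    have step1 :
        (PySem.List.pyRange 0 (data.length : Int) 1).foldl (fun acc y =>
          if x = i ∧ y = j then acc
          else if PySem.List.pyGetD (PySem.List.pyGetD data i []) j "" =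
                  PySem.List.pyGetD (PySem.List.pyGetD data x []) y "" then
            pvWalk (data.length + 1) x y (x - i) (y - j) (data.length : Int)
              (pvWalk (data.length + 1) i j (-(x - i)) (-(y - j)) (data.length : Int) acc)
          else acc) acc
        = ((PySem.List.pyRange 0 (data.length : Int) 1).filter (fun y =>
            decide (¬(x = i ∧ y = j)) &&
            decide (PySem.List.pyGetD (PySem.List.pyGetD data i []) j "" =
                    PySem.List.pyGetD (PySem.List.pyGetD data x []) y ""))).foldl (fun acc y =>
            pvWalk (data.length + 1) x y (x - i) (y - j) (data.length : Int)
              (pvWalk (data.length + 1) i j (-(x - i)) (-(y - j)) (data.length : Int) acc)) acc := by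
      rw [← PySem.List.foldl_if_eq_foldl_filter]
      apply PySem.List.foldl_congr_mem
      intro acc' y _
      by_cases h1 : x = i ∧ y = j
      · simp [h1]
      · by_cases h2 : PySem.List.pyGetD (PySem.List.pyGetD data i []) j "" =
            PySem.List.pyGetD (PySem.List.pyGetD data x []) y ""
        · simp [h1, h2]
        · simp [h1, h2]
    rw [step1]
    apply PySem.List.foldl_congr_mem
    intro acc' y hy
    obtain ⟨hy', hp⟩ := List.mem_filter.mp hy
    obtain ⟨hy0, hyn⟩ := PySem.List.mem_pyRange_one.mp hy'
    have hne : ¬(x = i ∧ y = j) := by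
      have h := (Bool.and_eq_true _ _).mp hp |>.1
      simp only [decide_eq_true_eq] at h
      exact h
    exact pv_per_match (data.length : Int) i j x y hi0 hxi hxn hy0 hyn hne
      (data.length + 1) (by push_cast; omega) acc'
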